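-- pv_equiv track=rewrite | github.com/AlonurKomilov/analyticbot | core/services/adaptive_learning/learning/incremental/memory/memory_management_service.py | _sample_clustering_based
-- ===== SOURCE A (Python) =====
-- from typing import Any
--
-- def _sample_clustering_based(
--     buffer: list[dict[str, Any]], sample_size: int
-- ) -> list[dict[str, Any]]:
--     """Diversity-based sampling using clusters."""
--
--     # Group by cluster
--     clusters = {}
--     for item in buffer:
--         cluster_id = item.get("cluster_id", 0)
--         if cluster_id not in clusters:
--             clusters[cluster_id] = []
--         clusters[cluster_id].append(item)
--
--     # Sample evenly from clusters
--     sampled = []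
--     cluster_list = list(clusters.keys())
--
--     while len(sampled) < sample_size and cluster_list:
--         for cluster_id in cluster_list[:]:
--             if len(sampled) >= sample_size:
--                 break
--
--             cluster_items = clusters[cluster_id]
--             if cluster_items:
--                 sampled.append(cluster_items.pop())
--
--             # Remove empty clusters
--             if not cluster_items:
--                 cluster_list.remove(cluster_id)
--
--     return sampled
-- ===== SOURCE B (Python) =====
-- def _sample_clustering_based(buffer, sample_size):
--     """Diversity-based sampling using clusters (columnar round-robin re-implementation)."""
--     groups = {}
--     for item in buffer:
--         groups.setdefault(item.get("cluster_id", 0), []).append(item)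
--
--     cols = [list(reversed(g)) for g in groups.values()]
--     depth = max(map(len, cols), default=0)
--
--     sampled = []
--     for d in range(depth):
--         for col in cols:
--             if d < len(col):
--                 if len(sampled) >= sample_size:
--                     return sampled
--                 sampled.append(col[d])
--     return sampled
-- ===== Notes on version B (the rewrite author's own statement) =====
-- stated objective: alternative
-- what changed: Replaces A's destructive while-loop (per-round snapshot copies, in-place pops from the cluster lists, list.remove of emptied clusters) with a read-only columnar round-robin: each cluster list is reversed once and items are taken column-by-column by index until the sample budget is reached.
import Mathlib
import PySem

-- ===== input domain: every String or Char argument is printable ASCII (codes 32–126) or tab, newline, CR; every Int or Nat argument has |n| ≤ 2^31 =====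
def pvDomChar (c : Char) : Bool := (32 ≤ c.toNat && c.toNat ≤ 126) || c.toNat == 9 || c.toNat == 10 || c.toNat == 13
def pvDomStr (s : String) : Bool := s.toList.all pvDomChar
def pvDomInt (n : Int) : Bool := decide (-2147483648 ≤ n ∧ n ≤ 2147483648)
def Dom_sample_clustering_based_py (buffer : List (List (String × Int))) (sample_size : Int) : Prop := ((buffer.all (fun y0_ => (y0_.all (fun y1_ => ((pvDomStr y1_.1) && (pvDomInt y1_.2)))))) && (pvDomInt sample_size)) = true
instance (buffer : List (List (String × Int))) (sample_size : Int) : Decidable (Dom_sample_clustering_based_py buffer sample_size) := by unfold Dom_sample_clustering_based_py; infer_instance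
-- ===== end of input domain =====

-- B replaces A's destructive while-loop (snapshot copies, in-place pops, list.remove of emptied
-- clusters) by a read-only columnar round-robin over the reversed cluster lists; return values
-- are proved equal (A mutates nothing observable: its argument lists are not modified).

-- ===== PORT A =====
-- item.get("cluster_id", 0): first-match lookup in the item's association list
def pvKey (item : List (String × Int)) : Int := (PySem.Dict.mk item).getD "cluster_id" 0

-- A's grouping loop: 'if cluster_id not in clusters: clusters[cluster_id] = []' then append
def pvAGroup (buffer : List (List (String × Int))) : PySem.Dict Int (List (List (String × Int))) :=
  buffer.foldl (fun clusters item =>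
    let cid := pvKey item
    let clusters' := if clusters.contains cid then clusters else clusters.insert cid []
    clusters'.modify cid [] (fun l => l ++ [item])) PySem.Dict.empty

-- one pass of A's 'for cluster_id in cluster_list[:]' body (the snapshot is consumed structurally;
-- 'cluster_items.pop()' is PySem.List.pop? items (-1); 'cluster_list.remove' is PySem.List.remove?,
-- whose .getD fallback is never taken since cid is always present)
def pvAInner (sample_size : Int) :
    List Int → PySem.Dict Int (List (List (String × Int))) → List Int → List (List (String × Int)) →
      PySem.Dict Int (List (List (String × Int))) × List Int × List (List (String × Int))
  | [], clusters, cluster_list, sampled => (clusters, cluster_list, sampled)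
  | cid :: snap, clusters, cluster_list, sampled =>
    if sample_size ≤ (sampled.length : Int) then (clusters, cluster_list, sampled)   -- break
    else
      match PySem.List.pop? (clusters.getD cid []) (-1) with
      | some (last, rest) =>
        let clusters' := clusters.insert cid rest
        let sampled' := sampled ++ [last]
        let cluster_list' :=
          if rest.isEmpty then (PySem.List.remove? cluster_list cid).getD cluster_list
          else cluster_list
        pvAInner sample_size snap clusters' cluster_list' sampled'
      | none =>   -- cluster was already empty: no pop, it is removed
        pvAInner sample_size snap clusters
          ((PySem.List.remove? cluster_list cid).getD cluster_list) sampled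

-- A's outer while-loop; the fuel only makes the loop structurally total, it is proved
-- below never to run out on the states A reaches
def pvAWhile (sample_size : Int) :
    Nat → PySem.Dict Int (List (List (String × Int))) → List Int → List (List (String × Int)) →
      List (List (String × Int))
  | 0, _, _, sampled => sampled
  | fuel + 1, clusters, cluster_list, sampled =>
    if (sampled.length : Int) < sample_size ∧ cluster_list ≠ [] then
      let st := pvAInner sample_size cluster_list clusters cluster_list sampled
      pvAWhile sample_size fuel st.1 st.2.1 st.2.2
    else sampled

def sample_clustering_based_py (buffer : List (List (String × Int))) (sample_size : Int) :
    List (List (String × Int)) :=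
  let clusters := pvAGroup buffer
  let cluster_list := clusters.keys
  pvAWhile sample_size (buffer.length + cluster_list.length + 1) clusters cluster_list []

-- ===== PORT B =====
-- B's grouping loop: groups.setdefault(cid, []).append(item)
def pvBGroup (buffer : List (List (String × Int))) : PySem.Dict Int (List (List (String × Int))) :=
  buffer.foldl (fun groups item =>
    (groups.setdefault (pvKey item) []).modify (pvKey item) [] (fun l => l ++ [item]))
    PySem.Dict.empty

-- inner 'for col in cols' of B; the Bool reports the early 'return sampled'
def pvBInner (sample_size : Int) :
    List (List (List (String × Int))) → Nat → List (List (String × Int)) →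
      List (List (String × Int)) × Bool
  | [], _, sampled => (sampled, false)
  | col :: cols, d, sampled =>
    if d < col.length then
      if sample_size ≤ (sampled.length : Int) then (sampled, true)
      else pvBInner sample_size cols d (sampled ++ [(col[d]?).getD []])
    else pvBInner sample_size cols d sampled

-- outer 'for d in range(depth)' of B
def pvBOuter (sample_size : Int) (cols : List (List (List (String × Int)))) :
    List Nat → List (List (String × Int)) → List (List (String × Int))
  | [], sampled => sampled
  | d :: ds, sampled =>
    match pvBInner sample_size cols d sampled with
    | (sampled', true) => sampled'
    | (sampled', false) => pvBOuter sample_size cols ds sampled'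

def sample_clustering_based_py_alt (buffer : List (List (String × Int))) (sample_size : Int) :
    List (List (String × Int)) :=
  let cols := (pvBGroup buffer).values.map List.reverse
  let depth := cols.foldl (fun m c => max m c.length) 0
  pvBOuter sample_size cols (List.range depth) []

-- ===== PRECONDITION & SPEC =====
def Spec_sample_clustering_based_py (buffer : List (List (String × Int))) (sample_size : Int) (out : List (List (String × Int))) : Prop := out = sample_clustering_based_py_alt buffer sample_size
instance (buffer : List (List (String × Int))) (sample_size : Int) (out : List (List (String × Int))) : Decidable (Spec_sample_clustering_based_py buffer sample_size out) := by unfold Spec_sample_clustering_based_py; infer_instance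

-- ===== CLAIM (what is proved, stated in full; the proofs are below) =====
def Claim_equal_sample_clustering_based_py : Prop := ∀ (buffer : List (List (String × Int))) (sample_size : Int), Dom_sample_clustering_based_py buffer sample_size → Spec_sample_clustering_based_py buffer sample_size (sample_clustering_based_py buffer sample_size)

-- ===== LEMMAS AND PROOFS =====

-- the common grouping fold both A's and B's loops reduce to
def pvGrp (buffer : List (List (String × Int))) : PySem.Dict Int (List (List (String × Int))) :=
  buffer.foldl (fun d it => d.modify (pvKey it) [] (fun l => l ++ [it])) PySem.Dict.empty

theorem pvSumLe {α : Type} (l : List (List α)) (q : List α → Bool) :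
    (((l.filter q).map List.length).sum) ≤ ((l.map List.length).sum) := by
  induction l with
  | nil => simp
  | cons x xs ih =>
    by_cases h : q x <;> simp [h] <;> omega

theorem pvSumTailLt {α : Type} (ls : List (List α)) (h : ∃ x ∈ ls, x ≠ []) :
    ((ls.map List.tail).map List.length).sum < (ls.map List.length).sum := by
  induction ls with
  | nil => simp at h
  | cons x xs ih =>
    have hle : ((xs.map List.tail).map List.length).sum ≤ (xs.map List.length).sum := by
      simp only [List.map_map]
      apply List.sum_le_sum
      intro z _
      simp [List.length_tail]
    rcases h with ⟨y, hy, hne⟩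
    simp only [List.map_cons, List.sum_cons]
    rcases List.mem_cons.mp hy with rfl | hy'
    · have hlt : y.tail.length < y.length := by
        cases y with
        | nil => exact absurd rfl hne
        | cons a as => simp
      omega
    · have hlt := ih ⟨y, hy', hne⟩
      have hx : x.tail.length ≤ x.length := by simp [List.length_tail]
      omega

-- the round-robin core both loops compute: take the heads of the (still nonempty) lists,
-- column after column, while the budget lasts
def pvRR (ls : List (List (List (String × Int)))) (b : Int) : List (List (String × Int)) :=
  if h : ls.filter (fun l => !l.isEmpty) = [] then []
  else
    let col := ls.filterMap List.head?
    if b ≤ (col.length : Int) then col.take b.toNat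
    else col ++ pvRR ((ls.map List.tail).filter (fun l => !l.isEmpty)) (b - col.length)
termination_by (ls.map List.length).sum
decreasing_by
  have hrw : List.map (fun x : {x // x ∈ ls} => (x : List (List (String × Int))).tail) ls.attach
      = ls.map List.tail := by
    first
      | simp
      | simp [List.map_attach]
      | simp [List.map_attach, List.pmap_eq_map]
  rw [hrw]
  have hex : ∃ x ∈ ls, x ≠ [] := by
    rcases List.ne_nil_iff_exists_cons.mp h with ⟨y, ys, hy⟩
    have hmem : y ∈ ls.filter (fun l => !l.isEmpty) := by simp [hy]
    rcases List.mem_filter.mp hmem with ⟨h1, h2⟩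
    exact ⟨y, h1, by simpa using h2⟩
  calc (((ls.map List.tail).filter (fun l => !l.isEmpty)).map List.length).sum
      ≤ ((ls.map List.tail).map List.length).sum := pvSumLe _ _
    _ < (ls.map List.length).sum := pvSumTailLt ls hex

-- ===== derived characterisations =====

theorem pvRR_eq (ls : List (List (List (String × Int)))) (b : Int) :
    pvRR ls b =
      if ls.filter (fun l => !l.isEmpty) = [] then []
      else
        let col := ls.filterMap List.head?
        if b ≤ (col.length : Int) then col.take b.toNat
        else col ++ pvRR ((ls.map List.tail).filter (fun l => !l.isEmpty)) (b - col.length) := by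
  rw [pvRR]
  rfl

theorem pvRR_nonpos (ls : List (List (List (String × Int)))) (b : Int) (hb : b ≤ 0) :
    pvRR ls b = [] := by
  rw [pvRR_eq]
  split
  · rfl
  · have h0 : b.toNat = 0 := Int.toNat_of_nonpos hb
    have h1 : b ≤ ((ls.filterMap List.head?).length : Int) :=
      le_trans hb (Int.natCast_nonneg _)
    simp [h1, h0]

theorem pvModifyInsertNil (d : PySem.Dict Int (List (List (String × Int)))) (k : Int)
    (f : List (List (String × Int)) → List (List (String × Int))) (h : d.contains k = false) :
    (d.insert k []).modify k [] f = d.modify k [] f := by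
  show (d.insert k []).insert k (f ((d.insert k []).getD k [])) = d.insert k (f (d.getD k []))
  simp [PySem.Dict.getD_insert_self, PySem.Dict.insert_insert_self,
    PySem.Dict.getD_of_not_contains, h]

-- both grouping loops are the one modify-fold
theorem pvAGroup_eq (buffer : List (List (String × Int))) : pvAGroup buffer = pvGrp buffer := by
  unfold pvAGroup pvGrp
  congr 1
  funext d it
  by_cases h : d.contains (pvKey it) = true
  · simp [h]
  · have h' : d.contains (pvKey it) = false := by simpa using h
    simp only [h', Bool.false_eq_true, if_false]
    exact pvModifyInsertNil d (pvKey it) _ h'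

theorem pvBGroup_eq (buffer : List (List (String × Int))) : pvBGroup buffer = pvGrp buffer := by
  unfold pvBGroup pvGrp
  congr 1
  funext d it
  by_cases h : d.contains (pvKey it) = true
  · rw [PySem.Dict.setdefault_of_contains _ _ h]
  · have h' : d.contains (pvKey it) = false := by simpa using h
    rw [PySem.Dict.setdefault_of_not_contains _ _ h']
    exact pvModifyInsertNil d (pvKey it) _ h'

theorem pvGrp_getD (buffer : List (List (String × Int))) (c : Int) :
    (pvGrp buffer).getD c [] = buffer.filter (fun it => pvKey it == c) := by
  unfold pvGrp
  rw [show buffer.foldl (fun d it => d.modify (pvKey it) [] (fun l => l ++ [it])) PySem.Dict.empty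
      = (buffer.map (fun it => (pvKey it, it))).foldl
          (fun d p => d.modify p.1 [] (fun l => l ++ [p.2])) PySem.Dict.empty by
    rw [List.foldl_map]]
  rw [PySem.Dict.getD_foldl_modify_append]
  simp [List.filter_map, Function.comp_def]

theorem pvGrp_keys_nodup (buffer : List (List (String × Int))) : (pvGrp buffer).keys.Nodup := by
  unfold pvGrp
  apply PySem.Dict.nodup_keys_foldl_modify_key
  exact PySem.Dict.nodup_keys_empty

theorem pvGrp_vals_ne (buffer : List (List (String × Int))) :
    ∀ c ∈ (pvGrp buffer).keys, (pvGrp buffer).getD c [] ≠ [] := by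
  intro c hc
  have hc' : c ∈ buffer.map pvKey := by
    unfold pvGrp at hc
    rw [PySem.Dict.keys_foldl_modify_key] at hc
    rw [PySem.Set.mem_update] at hc
    simpa [PySem.Dict.keys_empty] using hc
  rcases List.mem_map.mp hc' with ⟨it, hit, hkey⟩
  rw [pvGrp_getD]
  intro hnil
  have hmem : it ∈ buffer.filter (fun it => pvKey it == c) :=
    List.mem_filter.mpr ⟨hit, by simp [hkey]⟩
  rw [hnil] at hmem
  simp at hmem

theorem pvGetLastD (l : List (List (String × Int))) (h : l ≠ []) :
    l.getLastD [] = l.getLast h := by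
  have h1 : l.getLast? = some (l.getLast h) := List.getLast?_eq_getLast h
  rw [List.getLastD_eq_getLast?, h1]
  rfl

theorem pvLengthPos (l : List (List (String × Int))) (h : l ≠ []) : 0 < l.length := by
  cases l with
  | nil => exact absurd rfl h
  | cons a as => simp

theorem pvDropLastEmptyIff (l : List (List (String × Int))) (h : l ≠ []) :
    (l.dropLast.isEmpty = true) ↔ l.length = 1 := by
  have hl : l.dropLast.length = l.length - 1 := List.length_dropLast
  have hp : 0 < l.length := pvLengthPos l h
  rw [List.isEmpty_iff]
  constructor
  · intro he
    rw [he] at hl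
    simp at hl
    omega
  · intro h1
    have h0 : l.dropLast.length = 0 := by omega
    cases hc : l.dropLast with
    | nil => rfl
    | cons x xs => rw [hc] at h0; simp at h0

-- ===== A-side loop characterisation =====

theorem pvFoldDrop_getD (snap : List Int) :
    ∀ (clusters : PySem.Dict Int (List (List (String × Int)))) (c : Int), snap.Nodup →
    (snap.foldl (fun d c => d.insert c ((d.getD c []).dropLast)) clusters).getD c []
      = if c ∈ snap then (clusters.getD c []).dropLast else clusters.getD c [] := by
  induction snap with
  | nil => intro clusters c _; simp
  | cons a snap ih =>
    intro clusters c hnd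
    rcases List.nodup_cons.mp hnd with ⟨ha, hnd'⟩
    simp only [List.foldl_cons]
    rw [ih _ c hnd']
    by_cases hc : c ∈ snap
    · have hca : c ≠ a := fun e => ha (e ▸ hc)
      simp [hc, List.mem_cons, PySem.Dict.getD_insert, hca]
    · by_cases hcc : c = a
      · subst hcc
        simp [hc, PySem.Dict.getD_insert_self]
      · simp [hc, hcc, PySem.Dict.getD_insert]

theorem pvRemoveMid (pre snap : List Int) (cid : Int) (h : cid ∉ pre) :
    (PySem.List.remove? (pre ++ cid :: snap) cid).getD (pre ++ cid :: snap) = pre ++ snap := by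
  have hm : cid ∈ pre ++ cid :: snap := by simp
  rw [PySem.List.remove?_eq_some_erase _ cid hm]
  rw [List.erase_append_right _ h, List.erase_cons_head]
  rfl

theorem pvPopLast (l : List (List (String × Int))) (h : l ≠ []) :
    PySem.List.pop? l (-1) = some (l.getLastD [], l.dropLast) := by
  conv_lhs => rw [← List.dropLast_append_getLast h]
  rw [PySem.List.pop?_last]
  rw [pvGetLastD l h]

theorem pvAInner_sampled (n : Int) (snap : List Int) :
    ∀ (clusters : PySem.Dict Int (List (List (String × Int)))) (pre : List Int)
      (sampled : List (List (String × Int))),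
    snap.Nodup → (∀ c ∈ snap, c ∉ pre) → (∀ c ∈ snap, clusters.getD c [] ≠ []) →
    (pvAInner n snap clusters (pre ++ snap) sampled).2.2
      = sampled ++ (snap.map (fun c => (clusters.getD c []).getLastD [])).take
          (n - sampled.length).toNat := by
  induction snap with
  | nil => intro clusters pre sampled _ _ _; simp [pvAInner]
  | cons cid snap ih =>
    intro clusters pre sampled hnd hpre hv
    rcases List.nodup_cons.mp hnd with ⟨hcid, hnd'⟩
    have hset : clusters.getD cid [] ≠ [] := hv cid (by simp)
    simp only [pvAInner]
    by_cases hb : n ≤ (sampled.length : Int)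
    · rw [if_pos hb]
      have h0 : (n - (sampled.length : Int)).toNat = 0 := by omega
      simp [h0]
    · rw [if_neg hb]
      rw [pvPopLast _ hset]
      dsimp only
      have hdrop : ∀ c ∈ snap, (clusters.insert cid ((clusters.getD cid []).dropLast)).getD c []
          = clusters.getD c [] := by
        intro c hc
        have : c ≠ cid := fun e => hcid (e ▸ hc)
        simp [PySem.Dict.getD_insert, this]
      have hmapeq : snap.map (fun c =>
            ((clusters.insert cid ((clusters.getD cid []).dropLast)).getD c []).getLastD [])
          = snap.map (fun c => (clusters.getD c []).getLastD []) :=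
        List.map_congr_left (fun c hc => by rw [hdrop c hc])
    -- the new sampled
      have hlen1 : (((sampled ++ [(clusters.getD cid []).getLastD []]).length : Nat) : Int)
          = (sampled.length : Int) + 1 := by simp
      have htake : (n - (sampled.length : Int)).toNat
          = (n - ((sampled ++ [(clusters.getD cid []).getLastD []]).length : Int)).toNat + 1 := by
        rw [hlen1]; omega
      have hvals' : ∀ c ∈ snap,
          (clusters.insert cid ((clusters.getD cid []).dropLast)).getD c [] ≠ [] := by
        intro c hc; rw [hdrop c hc]; exact hv c (by simp [hc])
      by_cases hEmp : ((clusters.getD cid []).dropLast).isEmpty = true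
      · rw [if_pos hEmp]
        rw [pvRemoveMid pre snap cid (fun hmem => hpre cid (by simp) hmem)]
        rw [ih _ pre _ hnd' (fun c hc => hpre c (by simp [hc])) hvals']
        rw [hmapeq, List.map_cons, htake, List.take_succ_cons]
        simp
      · rw [if_neg hEmp]
        rw [show pre ++ cid :: snap = (pre ++ [cid]) ++ snap by simp]
        rw [ih _ (pre ++ [cid]) _ hnd' (fun c hc => by
            intro hmem
            rcases List.mem_append.mp hmem with h1 | h1
            · exact hpre c (by simp [hc]) h1
            · exact hcid ((List.mem_singleton.mp h1) ▸ hc)) hvals']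
        rw [hmapeq, List.map_cons, htake, List.take_succ_cons]
        simp

theorem pvAInner_full (n : Int) (snap : List Int) :
    ∀ (clusters : PySem.Dict Int (List (List (String × Int)))) (pre : List Int)
      (sampled : List (List (String × Int))),
    snap.Nodup → (∀ c ∈ snap, c ∉ pre) → (∀ c ∈ snap, clusters.getD c [] ≠ []) →
    ((sampled.length : Int) + snap.length ≤ n) →
    pvAInner n snap clusters (pre ++ snap) sampled
      = (snap.foldl (fun d c => d.insert c ((d.getD c []).dropLast)) clusters,
         pre ++ snap.filter (fun c => (clusters.getD c []).length != 1),
         sampled ++ snap.map (fun c => (clusters.getD c []).getLastD [])) := by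
  induction snap with
  | nil => intro clusters pre sampled _ _ _ _; simp [pvAInner]
  | cons cid snap ih =>
    intro clusters pre sampled hnd hpre hv hbud
    rcases List.nodup_cons.mp hnd with ⟨hcid, hnd'⟩
    have hset : clusters.getD cid [] ≠ [] := hv cid (by simp)
    have hlenpos : 0 < (clusters.getD cid []).length := pvLengthPos _ hset
    simp only [pvAInner]
    have hb : ¬ (n ≤ (sampled.length : Int)) := by
      simp only [List.length_cons] at hbud
      push_cast at hbud ⊢
      omega
    rw [if_neg hb]
    rw [pvPopLast _ hset]
    dsimp only
    have hdrop : ∀ c ∈ snap, (clusters.insert cid ((clusters.getD cid []).dropLast)).getD c []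
        = clusters.getD c [] := by
      intro c hc
      have : c ≠ cid := fun e => hcid (e ▸ hc)
      simp [PySem.Dict.getD_insert, this]
    have hvals' : ∀ c ∈ snap,
        (clusters.insert cid ((clusters.getD cid []).dropLast)).getD c [] ≠ [] := by
      intro c hc; rw [hdrop c hc]; exact hv c (by simp [hc])
    have hbud' : (((sampled ++ [(clusters.getD cid []).getLastD []]).length : Nat) : Int)
        + (snap.length : Int) ≤ n := by
      simp only [List.length_cons] at hbud
      push_cast at hbud ⊢
      simp
      omega
    have hmapeq : snap.map (fun c =>
          ((clusters.insert cid ((clusters.getD cid []).dropLast)).getD c []).getLastD [])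
        = snap.map (fun c => (clusters.getD c []).getLastD []) :=
      List.map_congr_left (fun c hc => by rw [hdrop c hc])
    have hfileq : snap.filter (fun c =>
          (((clusters.insert cid ((clusters.getD cid []).dropLast)).getD c []).length != 1))
        = snap.filter (fun c => ((clusters.getD c []).length != 1)) :=
      List.filter_congr (fun c hc => by rw [hdrop c hc])
    by_cases hEmp : ((clusters.getD cid []).dropLast).isEmpty = true
    · rw [if_pos hEmp]
      rw [pvRemoveMid pre snap cid (fun hmem => hpre cid (by simp) hmem)]
      rw [ih _ pre _ hnd' (fun c hc => hpre c (by simp [hc])) hvals' hbud']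
      have hone : ((clusters.getD cid []).length != 1) = false := by
        simp [(pvDropLastEmptyIff _ hset).mp hEmp]
      simp [List.filter_cons, hone, hfileq]
      intro a ha
      rw [hdrop a ha]
    · rw [if_neg hEmp]
      rw [show pre ++ cid :: snap = (pre ++ [cid]) ++ snap by simp]
      rw [ih _ (pre ++ [cid]) _ hnd' (fun c hc => by
          intro hmem
          rcases List.mem_append.mp hmem with h1 | h1
          · exact hpre c (by simp [hc]) h1
          · exact hcid ((List.mem_singleton.mp h1) ▸ hc)) hvals' hbud']
      have hone : ((clusters.getD cid []).length != 1) = true := by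
        simp only [bne_iff_ne, ne_eq, decide_eq_true_eq]
        intro h1
        exact hEmp ((pvDropLastEmptyIff _ hset).mpr h1)
      simp [List.filter_cons, hone, hfileq, List.append_assoc]
      intro a ha
      rw [hdrop a ha]

theorem pvColA (clusters : PySem.Dict Int (List (List (String × Int)))) (cl : List Int)
    (hv : ∀ c ∈ cl, clusters.getD c [] ≠ []) :
    (cl.map (fun c => (clusters.getD c []).reverse)).filterMap List.head?
      = cl.map (fun c => (clusters.getD c []).getLastD []) := by
  induction cl with
  | nil => simp
  | cons a cl ih =>
    have ha : clusters.getD a [] ≠ [] := hv a (by simp)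
    simp only [List.map_cons, List.filterMap_cons]
    rw [List.head?_reverse]
    have hsome : (clusters.getD a []).getLast? = some ((clusters.getD a []).getLastD []) := by
      rw [pvGetLastD _ ha]
      exact List.getLast?_eq_getLast ha
    rw [hsome]
    rw [ih (fun c hc => hv c (by simp [hc]))]

theorem pvAWhile_done (n : Int) (fuel : Nat)
    (clusters : PySem.Dict Int (List (List (String × Int)))) (cl : List Int)
    (sampled : List (List (String × Int))) (h : n ≤ (sampled.length : Int)) :
    pvAWhile n fuel clusters cl sampled = sampled := by
  cases fuel with
  | zero => rfl
  | succ fuel =>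
    simp only [pvAWhile]
    rw [if_neg]
    rintro ⟨h1, -⟩
    omega

theorem pvFilterNe (clusters : PySem.Dict Int (List (List (String × Int)))) (cl : List Int)
    (hv : ∀ c ∈ cl, clusters.getD c [] ≠ []) :
    (cl.map (fun c => (clusters.getD c []).reverse)).filter (fun l => !l.isEmpty)
      = cl.map (fun c => (clusters.getD c []).reverse) := by
  rw [List.filter_eq_self]
  intro a ha
  rcases List.mem_map.mp ha with ⟨c, hc, rfl⟩
  have h2 : (clusters.getD c []).reverse ≠ [] := by simpa using hv c hc
  simp [List.isEmpty_eq_false_iff.mpr h2]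

theorem pvIsEmptyRev (l : List (List (String × Int))) : l.reverse.isEmpty = l.isEmpty := by
  cases l with
  | nil => rfl
  | cons a as =>
    have h1 : (a :: as).reverse ≠ [] := by simp
    rw [List.isEmpty_eq_false_iff.mpr h1]
    rfl

theorem pvSumFilterPred (clusters : PySem.Dict Int (List (List (String × Int)))) :
    ∀ (cl : List Int), (∀ c ∈ cl, clusters.getD c [] ≠ []) →
    ((cl.filter (fun c => (clusters.getD c []).length != 1)).map
        (fun c => (clusters.getD c []).length - 1)).sum
      + (cl.filter (fun c => (clusters.getD c []).length != 1)).length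
      ≤ (cl.map (fun c => (clusters.getD c []).length)).sum := by
  intro cl
  induction cl with
  | nil => intro _; simp
  | cons a cl ih =>
    intro hv
    have ha : 0 < (clusters.getD a []).length := pvLengthPos _ (hv a (by simp))
    have ih' := ih (fun c hc => hv c (by simp [hc]))
    by_cases hp : ((clusters.getD a []).length != 1) = true
    · simp only [List.filter_cons, hp, if_true, List.map_cons, List.sum_cons, List.length_cons]
      omega
    · simp only [List.filter_cons, hp, Bool.false_eq_true, if_false, List.map_cons,
        List.sum_cons]
      omega

theorem pvAWhile_rr (n : Int) (fuel : Nat) :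
    ∀ (clusters : PySem.Dict Int (List (List (String × Int)))) (cl : List Int)
      (sampled : List (List (String × Int))),
    cl.Nodup → (∀ c ∈ cl, clusters.getD c [] ≠ []) →
    (cl.map (fun c => (clusters.getD c []).length)).sum + cl.length < fuel →
    pvAWhile n fuel clusters cl sampled
      = sampled ++ pvRR (cl.map (fun c => (clusters.getD c []).reverse))
          (n - sampled.length) := by
  induction fuel with
  | zero => intro clusters cl sampled _ _ hm; omega
  | succ fuel ih =>
    intro clusters cl sampled hnd hv hm
    by_cases hcond : (sampled.length : Int) < n ∧ cl ≠ []
    · have hA : pvAWhile n (fuel + 1) clusters cl sampled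
          = pvAWhile n fuel (pvAInner n cl clusters cl sampled).1
              (pvAInner n cl clusters cl sampled).2.1 (pvAInner n cl clusters cl sampled).2.2 := by
        simp only [pvAWhile]
        rw [if_pos hcond]
      rw [hA]
      obtain ⟨hlt, hne⟩ := hcond
      have hclpos : 0 < cl.length := by
        cases cl with
        | nil => exact absurd rfl hne
        | cons a as => simp
      have hpre : ∀ c ∈ cl, c ∉ ([] : List Int) := by simp
      have hfil := pvFilterNe clusters cl hv
      have hcol := pvColA clusters cl hv
      by_cases hb : n - (sampled.length : Int) ≤ (cl.length : Int)
      · -- the budget runs out during this pass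
        have hs := pvAInner_sampled n cl clusters [] sampled hnd hpre hv
        simp only [List.nil_append] at hs
        have hslen : ((pvAInner n cl clusters cl sampled).2.2.length : Int)
            = (sampled.length : Int) + (n - sampled.length) := by
          rw [hs]
          have hmin : ((cl.map (fun c => (clusters.getD c []).getLastD [])).take
              (n - (sampled.length : Int)).toNat).length = (n - (sampled.length : Int)).toNat := by
            rw [List.length_take]
            simp only [List.length_map]
            omega
          simp only [List.length_append, hmin]
          push_cast
          omega
        rw [pvAWhile_done n fuel _ _ _ (by omega)]
        rw [hs]
        rw [pvRR_eq]
        rw [if_neg (by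
          rw [hfil]
          intro hmapnil
          exact hne (List.map_eq_nil_iff.mp hmapnil))]
        simp only [hcol]
        rw [if_pos (by simpa using hb)]
      · -- a full pass: every cluster pops one item
        have hfull := pvAInner_full n cl clusters [] sampled hnd hpre hv
          (by push_cast; omega)
        simp only [List.nil_append] at hfull
        rw [hfull]
        set clusters' := cl.foldl (fun d c => d.insert c ((d.getD c []).dropLast)) clusters
          with hC
        set cl' := cl.filter (fun c => (clusters.getD c []).length != 1) with hcl'
        have hgetd : ∀ c ∈ cl', clusters'.getD c [] = (clusters.getD c []).dropLast := by
          intro c hc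
          rw [hC, pvFoldDrop_getD cl clusters c hnd]
          rw [if_pos (List.mem_of_mem_filter hc)]
        have hv' : ∀ c ∈ cl', clusters'.getD c [] ≠ [] := by
          intro c hc
          rw [hgetd c hc]
          have hcc : c ∈ cl := List.mem_of_mem_filter hc
          have hne1 : (clusters.getD c []).length ≠ 1 := by
            simpa using List.of_mem_filter hc
          have hpos : 0 < (clusters.getD c []).length := pvLengthPos _ (hv c hcc)
          intro hnil
          have h9 := congrArg List.length hnil
          rw [List.length_dropLast] at h9
          simp at h9
          omega
        have hnd' : cl'.Nodup := hnd.filter _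
        have hm' : (cl'.map (fun c => (clusters'.getD c []).length)).sum + cl'.length < fuel := by
          have h1 : (cl'.map (fun c => (clusters'.getD c []).length)).sum
              = (cl'.map (fun c => (clusters.getD c []).length - 1)).sum := by
            apply congrArg
            apply List.map_congr_left
            intro c hc
            rw [hgetd c hc, List.length_dropLast]
          rw [h1]
          have h2 := pvSumFilterPred clusters cl hv
          rw [← hcl'] at h2
          omega
        rw [ih clusters' cl'
          (sampled ++ cl.map (fun c => (clusters.getD c []).getLastD [])) hnd' hv' hm']
        have htails : ((cl.map (fun c => (clusters.getD c []).reverse)).map List.tail).filter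
              (fun l => !l.isEmpty)
            = cl'.map (fun c => (clusters'.getD c []).reverse) := by
          rw [List.map_map]
          have h3 : (List.tail ∘ fun c => (clusters.getD c []).reverse)
              = fun c => ((clusters.getD c []).dropLast).reverse := by
            funext c
            simp only [Function.comp_apply]
            rw [List.tail_reverse]
          rw [h3, List.filter_map]
          have h4 : cl.filter
                ((fun l => !l.isEmpty) ∘ fun c => (clusters.getD c []).dropLast.reverse)
              = cl' := by
            rw [hcl']
            apply List.filter_congr
            intro c hc
            simp only [Function.comp_apply]
            rw [pvIsEmptyRev]
            by_cases h1 : (clusters.getD c []).length = 1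
            · rw [(pvDropLastEmptyIff _ (hv c hc)).mpr h1]
              simp [h1]
            · have h2 : (clusters.getD c []).dropLast.isEmpty = false := by
                cases hcase : (clusters.getD c []).dropLast.isEmpty with
                | false => rfl
                | true => exact absurd ((pvDropLastEmptyIff _ (hv c hc)).mp hcase) h1
              rw [h2]
              simp [h1]
          rw [h4]
          apply List.map_congr_left
          intro c hc
          rw [hgetd c hc]
        have hexp : pvRR (cl.map (fun c => (clusters.getD c []).reverse))
              (n - (sampled.length : Int))
            = (cl.map (fun c => (clusters.getD c []).getLastD []))
              ++ pvRR (cl'.map (fun c => (clusters'.getD c []).reverse))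
                   (n - (sampled.length : Int) - (cl.length : Int)) := by
          rw [pvRR_eq]
          rw [if_neg (by
            rw [hfil]
            intro hmapnil
            exact hne (List.map_eq_nil_iff.mp hmapnil))]
          simp only [hcol]
          rw [if_neg (by simp only [List.length_map]; omega)]
          rw [htails]
          simp only [List.length_map]
        rw [hexp]
        rw [← List.append_assoc]
        congr 2
        push_cast [List.length_append, List.length_map]
        ring
    · have hstop : pvAWhile n (fuel + 1) clusters cl sampled = sampled := by
        simp only [pvAWhile]
        rw [if_neg hcond]
      rw [hstop]
      rcases not_and_or.mp hcond with h1 | h1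
      · rw [pvRR_nonpos _ _ (by omega)]
        simp
      · have : cl = [] := not_not.mp h1
        subst this
        rw [show (([] : List Int).map (fun c => (clusters.getD c []).reverse)) = [] from rfl]
        rw [pvRR_eq]
        simp

theorem pvFilterSplitLen (buffer : List (List (String × Int))) (k : Int) :
    (buffer.filter (fun it => pvKey it == k)).length
      + (buffer.filter (fun it => !(pvKey it == k))).length = buffer.length := by
  induction buffer with
  | nil => simp
  | cons it buf ih =>
    by_cases h : (pvKey it == k) = true
    · rw [List.filter_cons, List.filter_cons, if_pos h, if_neg (by simp [h])]
      simp only [List.length_cons]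
      omega
    · have h' : (pvKey it == k) = false := by simpa using h
      rw [List.filter_cons, List.filter_cons, if_neg (by simp [h']), if_pos (by simp [h'])]
      simp only [List.length_cons]
      omega

theorem pvSumBound : ∀ (ks : List Int) (buffer : List (List (String × Int))), ks.Nodup →
    (ks.map (fun c => (buffer.filter (fun it => pvKey it == c)).length)).sum
      ≤ buffer.length := by
  intro ks
  induction ks with
  | nil => intro buffer _; simp
  | cons k ks ih =>
    intro buffer hnd
    rcases List.nodup_cons.mp hnd with ⟨hk, hnd'⟩
    simp only [List.map_cons, List.sum_cons]
    have hterm : (ks.map (fun c => (buffer.filter (fun it => pvKey it == c)).length)).sum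
        = (ks.map (fun c => ((buffer.filter (fun it => !(pvKey it == k))).filter
            (fun it => pvKey it == c)).length)).sum := by
      apply congrArg
      apply List.map_congr_left
      intro c hc
      have hck : c ≠ k := fun e => hk (e ▸ hc)
      rw [List.filter_filter]
      congr 1
      apply List.filter_congr
      intro it _
      by_cases h : pvKey it = c
      · have h2 : (pvKey it == k) = false := by
          simp only [beq_eq_false_iff_ne, ne_eq]
          rw [h]
          exact hck
        simp [h, h2, hck]
      · simp [h]
    rw [hterm]
    have h3 := ih (buffer.filter (fun it => !(pvKey it == k))) hnd'
    have hsplit := pvFilterSplitLen buffer k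
    omega

-- ===== B-side loop characterisation =====

theorem pvBInner_eq (n : Int) (cols : List (List (List (String × Int)))) :
    ∀ (d : Nat) (sampled : List (List (String × Int))),
    pvBInner n cols d sampled
      = (sampled ++ (cols.filterMap (fun x => x[d]?)).take (n - sampled.length).toNat,
         decide (0 < (cols.filterMap (fun x => x[d]?)).length
           ∧ (n - (sampled.length : Int)) < (cols.filterMap (fun x => x[d]?)).length)) := by
  induction cols with
  | nil => intro d sampled; simp [pvBInner]
  | cons col cols ih =>
    intro d sampled
    simp only [pvBInner]
    by_cases hd : d < col.length
    · rw [if_pos hd]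
      have hsome : col[d]? = some col[d] := List.getElem?_eq_getElem hd
      have hfm : (col :: cols).filterMap (fun x => x[d]?)
          = col[d] :: cols.filterMap (fun x => x[d]?) := by
        rw [List.filterMap_cons, hsome]
      by_cases hb : n ≤ (sampled.length : Int)
      · rw [if_pos hb]
        have ht : (n - (sampled.length : Int)).toNat = 0 := by omega
        rw [hfm]
        simp only [ht, List.take_zero, List.append_nil, Prod.mk.injEq, List.length_cons]
        exact ⟨trivial, (decide_eq_true ⟨by omega, by push_cast; omega⟩).symm⟩
      · rw [if_neg hb]
        rw [ih d (sampled ++ [(col[d]?).getD []])]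
        rw [hfm]
        have hx : (col[d]?).getD [] = col[d] := by rw [hsome]; rfl
        have hlen : (((sampled ++ [(col[d]?).getD []]).length : Nat) : Int)
            = (sampled.length : Int) + 1 := by simp
        simp only [Prod.mk.injEq]
        constructor
        · have ht : (n - (sampled.length : Int)).toNat
              = (n - ((sampled ++ [(col[d]?).getD []]).length : Int)).toNat + 1 := by
            rw [hlen]; omega
          rw [ht, List.take_succ_cons, hx]
          simp [List.append_assoc]
        · have h7 : n - ((sampled ++ [(col[d]?).getD []]).length : Int)
              = n - (sampled.length : Int) - 1 := by rw [hlen]; ring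
          rw [h7]
          simp only [List.length_cons, decide_eq_decide]
          push_cast
          omega
    · rw [if_neg hd]
      rw [ih d sampled]
      have hnone : col[d]? = none := by rw [List.getElem?_eq_none_iff]; omega
      have hfm : (col :: cols).filterMap (fun x => x[d]?)
          = cols.filterMap (fun x => x[d]?) := by
        rw [List.filterMap_cons, hnone]
      rw [hfm]

theorem pvColsHeads (cols : List (List (List (String × Int)))) (d : Nat) :
    ((cols.map (List.drop d)).filter (fun l => !l.isEmpty)).filterMap List.head?
      = cols.filterMap (fun x => x[d]?) := by
  induction cols with
  | nil => simp
  | cons col cols ih =>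
    by_cases h : d < col.length
    · have h1 : (col.drop d).isEmpty = false := by
        rw [List.isEmpty_eq_false_iff]
        simp only [ne_eq, List.drop_eq_nil_iff]
        omega
      have h2 : (col.drop d).head? = col[d]? := List.head?_drop ..
      have h3 : col[d]? = some col[d] := List.getElem?_eq_getElem h
      simp [List.filter_cons, h1, List.filterMap_cons, h2, h3, ih]
    · have h1 : (col.drop d).isEmpty = true := by
        rw [List.isEmpty_iff, List.drop_eq_nil_iff]
        omega
      have h3 : col[d]? = none := by rw [List.getElem?_eq_none_iff]; omega
      simp [List.filter_cons, h1, List.filterMap_cons, h3, ih]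

theorem pvColsTails (cols : List (List (List (String × Int)))) (d : Nat) :
    ((((cols.map (List.drop d)).filter (fun l => !l.isEmpty)).map List.tail).filter
        (fun l => !l.isEmpty))
      = (cols.map (List.drop (d + 1))).filter (fun l => !l.isEmpty) := by
  induction cols with
  | nil => simp
  | cons c cols ih =>
    by_cases h : d < c.length
    · have h1 : (c.drop d).isEmpty = false := by
        rw [List.isEmpty_eq_false_iff]
        simp only [ne_eq, List.drop_eq_nil_iff]
        omega
      have h2 : (c.drop d).tail = c.drop (d + 1) := by rw [List.tail_drop]
      simp only [List.map_cons, List.filter_cons, h1, Bool.not_false, if_true, List.map_cons,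
        h2, ih]
    · have h1 : (c.drop d).isEmpty = true := by
        rw [List.isEmpty_iff, List.drop_eq_nil_iff]
        omega
      have h2 : (c.drop (d + 1)).isEmpty = true := by
        rw [List.isEmpty_iff, List.drop_eq_nil_iff]
        omega
      simp only [List.map_cons, List.filter_cons, h1, h2, Bool.not_true, Bool.false_eq_true,
        if_false, ih]

theorem pvFoldMax_le_acc (cols : List (List (List (String × Int)))) :
    ∀ a : Nat, a ≤ cols.foldl (fun m c => max m c.length) a := by
  induction cols with
  | nil => intro a; simp
  | cons c cols ih =>
    intro a
    simp only [List.foldl_cons]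
    exact le_trans (le_max_left a c.length) (ih _)

theorem pvDepthGe (cols : List (List (List (String × Int)))) (c : List (List (String × Int))) :
    ∀ a : Nat, c ∈ cols → c.length ≤ cols.foldl (fun m c => max m c.length) a := by
  induction cols with
  | nil => intro a hc; simp at hc
  | cons x cols ih =>
    intro a hc
    simp only [List.foldl_cons]
    rcases List.mem_cons.mp hc with rfl | hc'
    · exact le_trans (le_max_right a c.length) (pvFoldMax_le_acc cols _)
    · exact ih _ hc'

theorem pvDepthLt (cols : List (List (List (String × Int)))) (d : Nat)
    (h : d < cols.foldl (fun m c => max m c.length) 0) : ∃ c ∈ cols, d < c.length := by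
  by_contra hcon
  push_neg at hcon
  have haux : ∀ (cols' : List (List (List (String × Int)))) (a : Nat),
      (∀ c ∈ cols', c.length ≤ d) → a ≤ d →
      cols'.foldl (fun m c => max m c.length) a ≤ d := by
    intro cols'
    induction cols' with
    | nil => intro a _ ha; simpa using ha
    | cons x cols' ih =>
      intro a hall ha
      simp only [List.foldl_cons]
      exact ih _ (fun c hc => hall c (by simp [hc])) (by
        have := hall x (by simp)
        omega)
  have := haux cols 0 hcon (Nat.zero_le d)
  omega

theorem pvBOuter_rr (n : Int) (cols : List (List (List (String × Int)))) :
    ∀ (k d : Nat) (sampled : List (List (String × Int))),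
    (cols.foldl (fun m c => max m c.length) 0) - d = k →
    pvBOuter n cols (List.range' d k) sampled
      = sampled ++ pvRR ((cols.map (List.drop d)).filter (fun l => !l.isEmpty))
          (n - sampled.length) := by
  intro k
  induction k with
  | zero =>
    intro d sampled h
    simp only [List.range', pvBOuter]
    have hls : (cols.map (List.drop d)).filter (fun l => !l.isEmpty) = [] := by
      rw [List.filter_eq_nil_iff]
      intro a ha
      rcases List.mem_map.mp ha with ⟨c, hc, rfl⟩
      have hd := pvDepthGe cols c 0 hc
      have hlen : c.length ≤ d := by omega
      simp only [Bool.not_eq_true, Bool.not_eq_false']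
      rw [List.isEmpty_iff, List.drop_eq_nil_iff]
      omega
    rw [hls, pvRR_eq]
    simp
  | succ k ih =>
    intro d sampled h
    have hd : d < cols.foldl (fun m c => max m c.length) 0 := by omega
    rw [List.range'_succ]
    simp only [pvBOuter]
    rw [pvBInner_eq]
    rcases pvDepthLt cols d hd with ⟨c0, hc0, hc0len⟩
    have hcolne : cols.filterMap (fun x => x[d]?) ≠ [] := by
      intro hnil
      have h0 := List.filterMap_eq_nil_iff.mp hnil c0 hc0
      simp only [List.getElem?_eq_none_iff] at h0
      omega
    have hcolpos : 0 < (cols.filterMap (fun x => x[d]?)).length := by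
      cases hc : cols.filterMap (fun x => x[d]?) with
      | nil => exact absurd hc hcolne
      | cons x xs => simp
    have hlsne : (cols.map (List.drop d)).filter (fun l => !l.isEmpty) ≠ [] := by
      intro hnil
      have h0 := pvColsHeads cols d
      rw [hnil] at h0
      exact hcolne h0.symm
    have hfilfil : ((cols.map (List.drop d)).filter (fun l => !l.isEmpty)).filter
        (fun l => !l.isEmpty) = (cols.map (List.drop d)).filter (fun l => !l.isEmpty) := by
      rw [List.filter_filter]
      apply List.filter_congr
      intro a _
      cases a.isEmpty <;> rfl
    by_cases hflag : 0 < (cols.filterMap (fun x => x[d]?)).length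
        ∧ (n - (sampled.length : Int)) < (cols.filterMap (fun x => x[d]?)).length
    · rw [decide_eq_true hflag]
      dsimp only
      rw [pvRR_eq]
      rw [if_neg (by rw [hfilfil]; exact hlsne)]
      simp only [pvColsHeads]
      rw [if_pos (by omega)]
    · rw [decide_eq_false hflag]
      dsimp only
      have hble : ((cols.filterMap (fun x => x[d]?)).length : Int)
          ≤ n - (sampled.length : Int) := by
        rcases not_and_or.mp hflag with h' | h'
        · omega
        · omega
      have htakeall : (cols.filterMap (fun x => x[d]?)).take
          (n - (sampled.length : Int)).toNat = cols.filterMap (fun x => x[d]?) := by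
        apply List.take_of_length_le
        omega
      rw [htakeall]
      rw [ih (d + 1) _ (by omega)]
      have hexp : pvRR ((cols.map (List.drop d)).filter (fun l => !l.isEmpty))
            (n - (sampled.length : Int))
          = (cols.filterMap (fun x => x[d]?))
            ++ pvRR ((cols.map (List.drop (d + 1))).filter (fun l => !l.isEmpty))
                 (n - (sampled.length : Int)
                   - ((cols.filterMap (fun x => x[d]?)).length : Int)) := by
        rw [pvRR_eq]
        rw [if_neg (by rw [hfilfil]; exact hlsne)]
        simp only [pvColsHeads]
        by_cases hble2 : n - (sampled.length : Int)
            ≤ ((cols.filterMap (fun x => x[d]?)).length : Int)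
        · have hbeq : n - (sampled.length : Int)
              = ((cols.filterMap (fun x => x[d]?)).length : Int) := le_antisymm hble2 hble
          rw [if_pos hble2]
          rw [pvRR_nonpos _ _ (by omega)]
          rw [List.append_nil]
          have h5 : (n - (sampled.length : Int)).toNat
              = (cols.filterMap (fun x => x[d]?)).length := by omega
          rw [h5, List.take_length]
        · rw [if_neg hble2]
          rw [pvColsTails]
      rw [hexp]
      rw [← List.append_assoc]
      congr 2
      simp only [List.length_append]
      push_cast
      ring

theorem pvBOuter_range (n : Int) (cols : List (List (List (String × Int))))
    (sampled : List (List (String × Int))) :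
    pvBOuter n cols (List.range (cols.foldl (fun m c => max m c.length) 0)) sampled
      = sampled ++ pvRR ((cols.map (List.drop 0)).filter (fun l => !l.isEmpty))
          (n - sampled.length) := by
  rw [List.range_eq_range']
  exact pvBOuter_rr n cols _ 0 sampled rfl

-- ===== VERDICT (by name: the statement is the Claim_ definition above) =====
theorem sample_clustering_based_py_spec : Claim_equal_sample_clustering_based_py := by
  intro buffer n _dom
  unfold Spec_sample_clustering_based_py
  show sample_clustering_based_py buffer n = sample_clustering_based_py_alt buffer n
  simp only [sample_clustering_based_py, sample_clustering_based_py_alt]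
  rw [pvAGroup_eq, pvBGroup_eq]
  have hnd := pvGrp_keys_nodup buffer
  have hv := pvGrp_vals_ne buffer
  have hsum : ((pvGrp buffer).keys.map (fun c => ((pvGrp buffer).getD c []).length)).sum
      ≤ buffer.length := by
    have h1 : ((pvGrp buffer).keys.map (fun c => ((pvGrp buffer).getD c []).length)).sum
        = ((pvGrp buffer).keys.map
            (fun c => (buffer.filter (fun it => pvKey it == c)).length)).sum := by
      apply congrArg
      apply List.map_congr_left
      intro c _
      rw [pvGrp_getD]
    rw [h1]
    exact pvSumBound (pvGrp buffer).keys buffer hnd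
  rw [pvAWhile_rr n _ (pvGrp buffer) (pvGrp buffer).keys [] hnd hv (by omega)]
  have hvals : (pvGrp buffer).values
      = (pvGrp buffer).keys.map (fun c => (pvGrp buffer).getD c []) :=
    PySem.Dict.values_eq_map_keys _ hnd []
  rw [hvals]
  rw [pvBOuter_range n _ []]
  simp only [List.nil_append, List.length_nil, Nat.cast_zero, sub_zero]
  congr 1
  have hdrop0 : ((((pvGrp buffer).keys.map
        (fun c => (pvGrp buffer).getD c [])).map List.reverse).map (List.drop 0))
      = (((pvGrp buffer).keys.map (fun c => (pvGrp buffer).getD c [])).map List.reverse) := by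
    simp
  rw [hdrop0]
  have hall : ∀ a ∈ (((pvGrp buffer).keys.map
      (fun c => (pvGrp buffer).getD c [])).map List.reverse), (!a.isEmpty) = true := by
    intro a ha
    rcases List.mem_map.mp ha with ⟨b0, hb0, rfl⟩
    rcases List.mem_map.mp hb0 with ⟨c, hc, rfl⟩
    have h2 : ((pvGrp buffer).getD c []).reverse ≠ [] := by simpa using hv c hc
    simp [List.isEmpty_eq_false_iff.mpr h2]
  rw [List.filter_eq_self.mpr hall]
  rw [List.map_map]
  rfl
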